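-- pv_equiv track=rewrite | github.com/K-Sqr/python-problem-sets | TIPS 103/Unit3_S1_Stacks.py | arrange_guest_arrival_order
-- ===== SOURCE A (Python) =====
-- def arrange_guest_arrival_order(arrival_pattern):
--     guests = []
--     n = len(arrival_pattern)
--     guest_order = []
--
--
--     for i in range(n + 1):
--         guests.append(str(i + 1))
--         if i == n or arrival_pattern[i] == 'I':
--             while guests:
--                 guest_order.append(guests.pop())
--
--     return "".join(guest_order)
-- ===== SOURCE B (Python) =====
-- def arrange_guest_arrival_order(arrival_pattern):
--     n = len(arrival_pattern)
--     nums = [str(k + 1) for k in range(n + 1)]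
--     start = 0
--     for i, c in enumerate(arrival_pattern):
--         if c == 'I':
--             nums[start:i + 1] = nums[start:i + 1][::-1]
--             start = i + 1
--     nums[start:] = nums[start:][::-1]
--     return "".join(nums)
-- ===== Notes on version B (the rewrite author's own statement) =====
-- stated objective: alternative
-- what changed: B drops A's stack push/flush entirely: it builds the array of number strings 1..n+1 up front, walks the pattern with an index, reverses each slice nums[start:i+1] in place at every 'I' (and the final tail slice), and joins the array.
import Mathlib
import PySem

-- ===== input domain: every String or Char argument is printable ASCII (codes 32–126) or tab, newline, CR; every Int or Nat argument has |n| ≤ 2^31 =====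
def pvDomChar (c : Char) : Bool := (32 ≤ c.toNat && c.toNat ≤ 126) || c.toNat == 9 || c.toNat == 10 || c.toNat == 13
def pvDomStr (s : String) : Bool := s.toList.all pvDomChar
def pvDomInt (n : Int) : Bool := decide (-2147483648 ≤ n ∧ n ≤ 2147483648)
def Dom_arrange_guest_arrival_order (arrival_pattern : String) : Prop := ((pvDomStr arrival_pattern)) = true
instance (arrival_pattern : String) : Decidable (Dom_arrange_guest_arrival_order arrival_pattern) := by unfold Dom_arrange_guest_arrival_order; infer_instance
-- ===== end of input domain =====

-- B replaces A's stack push/flush with an indexable array of the numbers 1..n+1 and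
-- in-place slice reversals of the segments ending at each 'I' (objective: alternative).


-- ===== PORT A =====
-- A's loop 'for i in range(n+1)' runs one step per character plus one final step (i == n);
-- it is transcribed as structural recursion on the character list carrying the counter i.
-- 'guests' is the stack with its TOP at the head (append = cons; the while-pop loop pops
-- top first, i.e. appends the head-first stack list to guest_order).
def pvAGo (cs : List Char) (i : Int) (guests : List String) (guest_order : List String) :
    List String :=
  match cs with
  | [] => guest_order ++ (PySem.Int.toStr (i + 1) :: guests)   -- i == n: append then flush all
  | c :: rest =>
      let guests' := PySem.Int.toStr (i + 1) :: guests
      if c = 'I' then pvAGo rest (i + 1) [] (guest_order ++ guests')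
      else pvAGo rest (i + 1) guests' guest_order

def arrange_guest_arrival_order (arrival_pattern : String) : String :=
  PySem.Str.join "" (pvAGo arrival_pattern.toList 0 [] [])

-- ===== PORT B =====
-- nums[a:b+1] = nums[a:b+1][::-1]
def pvRevSeg (nums : List String) (a b : Nat) : List String :=
  nums.take a ++ ((nums.drop a).take (b + 1 - a)).reverse ++ nums.drop (b + 1)

-- the 'for i, c in enumerate(...)' loop: recursion on the characters carrying i and start
def pvBGo (cs : List Char) (i : Nat) (nums : List String) (start : Nat) : List String :=
  match cs with
  | [] => pvRevSeg nums start i            -- final 'nums[start:] = nums[start:][::-1]' (i = n)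
  | c :: rest =>
      if c = 'I' then pvBGo rest (i + 1) (pvRevSeg nums start i) (i + 1)
      else pvBGo rest (i + 1) nums start

def arrange_guest_arrival_order_alt (arrival_pattern : String) : String :=
  let cs := arrival_pattern.toList
  let n := cs.length
  let nums := (PySem.List.pyRange 0 (n + 1) 1).map (fun k => PySem.Int.toStr (k + 1))
  PySem.Str.join "" (pvBGo cs 0 nums 0)

-- ===== PRECONDITION & SPEC =====
def Spec_arrange_guest_arrival_order (arrival_pattern : String) (out : String) : Prop := out = arrange_guest_arrival_order_alt arrival_pattern
instance (arrival_pattern : String) (out : String) : Decidable (Spec_arrange_guest_arrival_order arrival_pattern out) := by unfold Spec_arrange_guest_arrival_order; infer_instance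

-- ===== CLAIM (what is proved, stated in full; the proofs are below) =====
def Claim_equal_arrange_guest_arrival_order : Prop := ∀ (arrival_pattern : String), Dom_arrange_guest_arrival_order arrival_pattern → Spec_arrange_guest_arrival_order arrival_pattern (arrange_guest_arrival_order arrival_pattern)

-- ===== LEMMAS AND PROOFS =====

-- common intermediate form: consume the pending number strings ps (one per step),
-- keeping the current descending block reversed in gs
def pvCore (cs : List Char) (ps : List String) (gs : List String) : List String :=
  match cs, ps with
  | [], [] => gs
  | [], p :: _ => p :: gs
  | _ :: rest, [] => pvCore rest [] gs
  | c :: rest, p :: ps' =>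
      if c = 'I' then (p :: gs) ++ pvCore rest ps' []
      else pvCore rest ps' (p :: gs)

theorem pvAGo_eq (cs : List Char) (i : Int) (gs order : List String) :
    pvAGo cs i gs order =
      order ++ pvCore cs ((List.range (cs.length + 1)).map
        (fun k : ℕ => PySem.Int.toStr (i + 1 + (k : Int)))) gs := by
  induction cs generalizing i gs order with
  | nil => simp [pvAGo, pvCore]
  | cons c rest ih =>
      simp only [pvAGo, List.length_cons]
      rw [List.range_succ_eq_map]
      simp only [List.map_cons, List.map_map, Nat.cast_zero]
      have hmap : ((List.range (rest.length + 1)).map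
          ((fun k : ℕ => PySem.Int.toStr (i + 1 + (k : Int))) ∘ Nat.succ)) =
          (List.range (rest.length + 1)).map (fun k : ℕ => PySem.Int.toStr (i + 1 + 1 + (k : Int))) := by
        apply List.map_congr_left
        intro k _
        simp only [Function.comp]
        congr 1
        push_cast
        ring
      rw [hmap]
      by_cases hc : c = 'I' <;>
        simp [hc, pvCore, ih, List.append_assoc]

-- pvF: pvBGo expressed on the still-untouched suffix tail = nums.drop start, with
-- m = i - start the length of the current pending block
def pvF (cs : List Char) (m : Nat) (tail : List String) : List String :=
  match cs with
  | [] => (tail.take (m + 1)).reverse ++ tail.drop (m + 1)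
  | c :: rest =>
      if c = 'I' then (tail.take (m + 1)).reverse ++ pvF rest 0 (tail.drop (m + 1))
      else pvF rest (m + 1) tail

theorem pvBGo_eq_pvF (cs : List Char) (i : Nat) (nums : List String) (start : Nat)
    (hsi : start ≤ i) (hlen : nums.length = i + cs.length + 1) :
    pvBGo cs i nums start = nums.take start ++ pvF cs (i - start) (nums.drop start) := by
  induction cs generalizing i nums start with
  | nil =>
      simp only [pvBGo, pvRevSeg, pvF, List.length_nil] at *
      have h1 : i - start + 1 = i + 1 - start := by omega
      have h2 : (nums.drop start).drop (i + 1 - start) = nums.drop (i + 1) := by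
        rw [List.drop_drop]; congr 1; omega
      rw [h1, h2, List.append_assoc]
  | cons c rest ih =>
      simp only [pvBGo, pvF, List.length_cons] at *
      by_cases hc : c = 'I'
      · simp only [hc]
        have hT : ((nums.drop start).take (i + 1 - start)).length = i + 1 - start := by
          rw [List.length_take, List.length_drop]; omega
        have hrevlen : (nums.take start ++ ((nums.drop start).take (i + 1 - start)).reverse).length
            = i + 1 := by
          simp only [List.length_append, List.length_take, List.length_reverse, hT]; omega
        have hRS : pvRevSeg nums start i
            = (nums.take start ++ ((nums.drop start).take (i + 1 - start)).reverse)
              ++ nums.drop (i + 1) := by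
          simp [pvRevSeg, List.append_assoc]
        have hlen' : (pvRevSeg nums start i).length = (i + 1) + rest.length + 1 := by
          rw [hRS, List.length_append, hrevlen, List.length_drop]; omega
        rw [ih (i + 1) _ (i + 1) le_rfl hlen']
        have htake : (pvRevSeg nums start i).take (i + 1)
            = nums.take start ++ ((nums.drop start).take (i + 1 - start)).reverse := by
          rw [hRS, List.take_append_of_le_length (by omega), List.take_of_length_le (by omega)]
        have hdrop : (pvRevSeg nums start i).drop (i + 1) = nums.drop (i + 1) := by
          rw [hRS, List.drop_append_of_le_length (by omega)]
          simp [hrevlen]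
        rw [htake, hdrop]
        have h1 : i - start + 1 = i + 1 - start := by omega
        have h2 : (nums.drop start).drop (i + 1 - start) = nums.drop (i + 1) := by
          rw [List.drop_drop]; congr 1; omega
        simp only [Nat.sub_self, h1, h2, List.append_assoc]
        simp
      · simp only [hc]
        rw [ih (i + 1) nums start (by omega) (by omega)]
        have h1 : i + 1 - start = (i - start) + 1 := by omega
        rw [h1]
        simp


theorem pvF_eq_pvCore (cs : List Char) (m : Nat) (tail : List String)
    (hlen : tail.length = m + cs.length + 1) :
    pvF cs m tail = pvCore cs (tail.drop m) ((tail.take m).reverse) := by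
  induction cs generalizing m tail with
  | nil =>
      simp only [List.length_nil] at hlen
      obtain ⟨p, rest, hdm⟩ : ∃ p rest, tail.drop m = p :: rest := by
        have h0 : 0 < (tail.drop m).length := by rw [List.length_drop]; omega
        match htl : tail.drop m with
        | [] => rw [htl] at h0; simp at h0
        | p :: rest => exact ⟨p, rest, rfl⟩
      have hp : tail[m]? = some p := by
        rw [← List.head?_drop, hdm, List.head?_cons]
      have htake : tail.take (m + 1) = tail.take m ++ [p] := by
        rw [List.take_add_one, hp]; rfl
      have hrest : rest = [] := by
        have h2 := congrArg List.length hdm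
        rw [List.length_drop] at h2
        simp only [List.length_cons] at h2
        have : rest.length = 0 := by omega
        exact List.eq_nil_of_length_eq_zero this
      have hdrop1 : tail.drop (m + 1) = [] := by
        have h2 := congrArg List.tail hdm
        rw [List.tail_drop, List.tail_cons] at h2
        rw [h2, hrest]
      simp [pvF, pvCore, hdm, htake, hdrop1, hrest]
  | cons c rest ih =>
      simp only [List.length_cons] at hlen
      obtain ⟨p, tl, hdm⟩ : ∃ p tl, tail.drop m = p :: tl := by
        have h0 : 0 < (tail.drop m).length := by rw [List.length_drop]; omega
        match htl : tail.drop m with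
        | [] => rw [htl] at h0; simp at h0
        | p :: tl => exact ⟨p, tl, rfl⟩
      have hp : tail[m]? = some p := by
        rw [← List.head?_drop, hdm, List.head?_cons]
      have htake : tail.take (m + 1) = tail.take m ++ [p] := by
        rw [List.take_add_one, hp]; rfl
      have hdrop1 : tail.drop (m + 1) = tl := by
        have h2 := congrArg List.tail hdm
        rwa [List.tail_drop, List.tail_cons] at h2
      by_cases hc : c = 'I'
      · have hlen' : (tail.drop (m + 1)).length = 0 + rest.length + 1 := by
          rw [List.length_drop]; omega
        rw [pvF, if_pos hc, ih 0 (tail.drop (m + 1)) hlen']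
        simp [pvCore, hc, hdm, htake, hdrop1]
      · have hlen' : tail.length = (m + 1) + rest.length + 1 := by omega
        rw [pvF, if_neg hc, ih (m + 1) tail hlen']
        simp [pvCore, hc, hdm, htake, hdrop1]

theorem lists_agree (cs : List Char) :
    pvAGo cs 0 [] [] =
      pvBGo cs 0 ((PySem.List.pyRange 0 (cs.length + 1) 1).map
        (fun k => PySem.Int.toStr (k + 1))) 0 := by
  set nums := (PySem.List.pyRange 0 (cs.length + 1) 1).map
    (fun k => PySem.Int.toStr (k + 1)) with hnums
  have hlen : nums.length = 0 + cs.length + 1 := by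
    simp [hnums, PySem.List.length_pyRange_one]
  rw [pvBGo_eq_pvF cs 0 nums 0 le_rfl hlen]
  simp only [Nat.sub_self, List.take_zero, List.drop_zero, List.nil_append]
  rw [pvF_eq_pvCore cs 0 nums (by omega)]
  simp only [List.take_zero, List.drop_zero, List.reverse_nil]
  rw [pvAGo_eq]
  have : nums = (List.range (cs.length + 1)).map
      (fun k : ℕ => PySem.Int.toStr ((0 : ℤ) + 1 + (k : Int))) := by
    rw [hnums, PySem.List.pyRange_one]
    simp only [List.map_map]
    apply List.map_congr_left
    intro k _
    simp only [Function.comp]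
    congr 1
    push_cast
    ring
  rw [this]
  simp only [List.nil_append]

-- ===== VERDICT (by name: the statement is the Claim_ definition above) =====
theorem arrange_guest_arrival_order_spec : Claim_equal_arrange_guest_arrival_order := by
  intro s _
  unfold Spec_arrange_guest_arrival_order arrange_guest_arrival_order arrange_guest_arrival_order_alt
  rw [lists_agree s.toList]
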